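-- pv_equiv track=rewrite | github.com/nt2311-vn/Leetcode_Top150 | K_WeakestRow/weakest.py | count_soldiers
-- ===== SOURCE A (Python) =====
-- from typing import List
--
-- def count_soldiers(row: List[int]) -> int:
--     i, j = 0, len(row) - 1
--
--     while i <= j:
--         mid = (i + j) // 2
--
--         if row[mid] == 1:
--             i = mid + 1
--         else:
--             j = mid - 1
--
--     return i
-- ===== SOURCE B (Python) =====
-- def count_soldiers(row):
--     # recursive binary search on a half-open interval [lo, hi)
--     def search(lo, hi):
--         if lo >= hi:
--             return lo
--         mid = (lo + hi - 1) // 2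
--         if row[mid] == 1:
--             return search(mid + 1, hi)
--         return search(lo, mid)
--     return search(0, len(row))
-- ===== Notes on version B (the rewrite author's own statement) =====
-- stated objective: alternative
-- what changed: The iterative two-pointer binary search over an inclusive interval [i, j] is re-decomposed as a recursive search over a half-open interval [lo, hi), probing the same midpoints ((lo+hi-1)//2 = (i+j)//2) and returning the same low bound.
import Mathlib
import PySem

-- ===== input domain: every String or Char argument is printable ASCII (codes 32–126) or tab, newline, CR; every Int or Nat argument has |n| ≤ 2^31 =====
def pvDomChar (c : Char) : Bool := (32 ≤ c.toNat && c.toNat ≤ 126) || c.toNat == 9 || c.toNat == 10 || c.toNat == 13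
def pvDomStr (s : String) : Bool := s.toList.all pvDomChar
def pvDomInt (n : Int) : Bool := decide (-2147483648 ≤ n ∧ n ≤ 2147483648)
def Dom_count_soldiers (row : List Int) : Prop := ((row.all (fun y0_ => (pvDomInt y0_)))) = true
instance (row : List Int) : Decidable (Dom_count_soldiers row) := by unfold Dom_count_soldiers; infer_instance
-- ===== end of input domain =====

-- B re-decomposes A's iterative inclusive-interval binary search as a recursive
-- half-open-interval search probing the same midpoints (alternative decomposition, same cost).

-- ===== PORT A =====
-- the while loop of A over the inclusive interval [i, j]; row[mid] is always in
-- range when reached (0 ≤ i ≤ mid ≤ j < len row), so pyGetD's default is unreachable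
def count_soldiers_loop (row : List Int) (i j : Int) : Int :=
  if h : i ≤ j then
    let mid := PySem.Int.floordiv (i + j) 2
    if PySem.List.pyGetD row mid 0 = 1 then count_soldiers_loop row (mid + 1) j
    else count_soldiers_loop row i (mid - 1)
  else i
termination_by (j + 1 - i).toNat
decreasing_by
  · have := PySem.Int.floordiv_two_mid_bounds h; omega
  · have := PySem.Int.floordiv_two_mid_bounds h; omega

def count_soldiers (row : List Int) : Int :=
  count_soldiers_loop row 0 ((row.length : Int) - 1)

-- ===== PORT B =====
-- B's recursive helper search(lo, hi) over the half-open interval [lo, hi)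
def count_soldiers_search (row : List Int) (lo hi : Int) : Int :=
  if h : lo < hi then
    let mid := PySem.Int.floordiv (lo + hi - 1) 2
    if PySem.List.pyGetD row mid 0 = 1 then count_soldiers_search row (mid + 1) hi
    else count_soldiers_search row lo mid
  else lo
termination_by (hi - lo).toNat
decreasing_by
  all_goals
    have hb := PySem.Int.floordiv_two_mid_bounds (show lo ≤ hi - 1 by omega)
    rw [show lo + (hi - 1) = lo + hi - 1 from by ring] at hb
    omega

def count_soldiers_alt (row : List Int) : Int :=
  count_soldiers_search row 0 (row.length : Int)

-- ===== PRECONDITION & SPEC =====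
def Spec_count_soldiers (row : List Int) (out : Int) : Prop := out = count_soldiers_alt row
instance (row : List Int) (out : Int) : Decidable (Spec_count_soldiers row out) := by unfold Spec_count_soldiers; infer_instance

-- ===== CLAIM (what is proved, stated in full; the proofs are below) =====
def Claim_equal_count_soldiers : Prop := ∀ (row : List Int), Dom_count_soldiers row → Spec_count_soldiers row (count_soldiers row)

-- ===== LEMMAS AND PROOFS =====
-- the inclusive-interval loop equals the half-open search with hi = j + 1
theorem loop_eq_search (row : List Int) :
    ∀ (n : Nat) (i j : Int), (j + 1 - i).toNat ≤ n →
      count_soldiers_loop row i j = count_soldiers_search row i (j + 1) := by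
  intro n
  induction n with
  | zero =>
    intro i j hn
    rw [count_soldiers_loop, count_soldiers_search]
    rw [dif_neg (by omega), dif_neg (by omega)]
  | succ n ih =>
    intro i j hn
    rw [count_soldiers_loop, count_soldiers_search]
    by_cases h : i ≤ j
    · rw [dif_pos h, dif_pos (by omega : i < j + 1)]
      have hmid : i + (j + 1) - 1 = i + j := by ring
      rw [hmid]
      have hb := PySem.Int.floordiv_two_mid_bounds h
      by_cases hv : PySem.List.pyGetD row (PySem.Int.floordiv (i + j) 2) 0 = 1
      · rw [if_pos hv, if_pos hv]
        exact ih _ _ (by omega)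
      · rw [if_neg hv, if_neg hv]
        have := ih i (PySem.Int.floordiv (i + j) 2 - 1) (by omega)
        simpa using this
    · rw [dif_neg h, dif_neg (by omega)]

-- ===== VERDICT (by name: the statement is the Claim_ definition above) =====
theorem count_soldiers_spec : Claim_equal_count_soldiers := by
  intro row _
  unfold Spec_count_soldiers count_soldiers count_soldiers_alt
  have := loop_eq_search row ((row.length : Int) - 1 + 1 - 0).toNat 0 ((row.length : Int) - 1) le_rfl
  simpa using this
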